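-- pv_equiv track=rewrite | github.com/Palak-Dhakrey/Python-training | Dictionary/main.py | nested_aggregation
-- ===== SOURCE A (Python) =====
-- def nested_aggregation(data):
--     dept_dict = {}
--     for dept, emp, salary in data:
--         if dept not in dept_dict:
--             dept_dict[dept] = []
--         dept_dict[dept].append((emp, salary))
--     for dept in dept_dict:
--         dept_dict[dept] = sorted(dept_dict[dept], key=lambda x: x[1], reverse=True)
--     return dept_dict
-- ===== SOURCE B (Python) =====
-- def nested_aggregation(data):
--     # One global stable sort by salary (descending); stability makes each
--     # department's rows already appear in A's per-group sorted order.
--     ordered = sorted(data, key=lambda x: x[2], reverse=True)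
--     result = {}
--     for dept, _, _ in data:          # keys in first-seen order of the input
--         if dept not in result:
--             result[dept] = []
--     for dept, emp, salary in ordered:
--         result[dept].append((emp, salary))
--     return result
-- ===== Notes on version B (the rewrite author's own statement) =====
-- stated objective: alternative
-- what changed: B replaces A's per-department sorted() calls by one global stable sort of the whole input by salary descending followed by a single grouping pass (keys pre-registered in first-seen order), relying on sort stability for the per-group order.
import Mathlib
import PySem

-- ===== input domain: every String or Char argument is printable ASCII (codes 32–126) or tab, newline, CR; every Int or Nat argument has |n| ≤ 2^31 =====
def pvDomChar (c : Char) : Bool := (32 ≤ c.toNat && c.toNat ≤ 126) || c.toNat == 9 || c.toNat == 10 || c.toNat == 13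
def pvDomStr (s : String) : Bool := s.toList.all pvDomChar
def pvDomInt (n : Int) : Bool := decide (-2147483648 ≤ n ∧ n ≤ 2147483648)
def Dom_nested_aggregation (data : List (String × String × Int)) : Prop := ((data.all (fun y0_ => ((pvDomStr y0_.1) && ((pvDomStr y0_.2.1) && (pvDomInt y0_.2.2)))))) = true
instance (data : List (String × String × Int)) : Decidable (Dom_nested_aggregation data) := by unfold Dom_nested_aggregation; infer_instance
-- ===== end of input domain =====

-- ===== PORT A =====
-- B replaces A's per-department sorted() calls by one global stable sort of the whole
-- input by salary descending followed by a single grouping pass (alternative decomposition).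
def nested_aggregation (data : List (String × String × Int)) : List (String × List (String × Int)) :=
  let dept_dict : PySem.Dict String (List (String × Int)) :=
    data.foldl (fun d t =>
      let d := if d.contains t.1 then d else d.insert t.1 []
      d.insert t.1 (d.getD t.1 [] ++ [t.2])) PySem.Dict.empty
  let dept_dict :=
    dept_dict.keys.foldl (fun d dept =>
      d.insert dept (PySem.List.sorted (d.getD dept []) (fun x => x.2) true)) dept_dict
  dept_dict.items

-- ===== PORT B =====
def nested_aggregation_alt (data : List (String × String × Int)) : List (String × List (String × Int)) :=
  let ordered := PySem.List.sorted data (fun x => x.2.2) true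
  let result : PySem.Dict String (List (String × Int)) :=
    data.foldl (fun d t => if d.contains t.1 then d else d.insert t.1 []) PySem.Dict.empty
  let result :=
    ordered.foldl (fun d t => d.insert t.1 (d.getD t.1 [] ++ [t.2])) result
  result.items

-- ===== PRECONDITION & SPEC =====
def Spec_nested_aggregation (data : List (String × String × Int)) (out : List (String × List (String × Int))) : Prop := out = nested_aggregation_alt data
instance (data : List (String × String × Int)) (out : List (String × List (String × Int))) : Decidable (Spec_nested_aggregation data out) := by unfold Spec_nested_aggregation; infer_instance

-- ===== CLAIM (what is proved, stated in full; the proofs are below) =====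
def Claim_equal_nested_aggregation : Prop := ∀ (data : List (String × String × Int)), Dom_nested_aggregation data → Spec_nested_aggregation data (nested_aggregation data)

-- ===== LEMMAS AND PROOFS =====

-- insertBy puts x in front when it goes before every element (only the head matters)
lemma insertBy_all_before {α : Type} (bef : α → α → Bool) (x : α) (zs : List α)
    (h : ∀ z ∈ zs, bef x z = true) : PySem.List.insertBy bef x zs = x :: zs := by
  cases zs with
  | nil => rfl
  | cons z zs => simp [PySem.List.insertBy, h z (by simp)]

-- filtering commutes with insertion into a key-descending list (stability)
lemma filter_insertBy {α : Type} (key : α → Int) (p : α → Bool) (x : α) :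
    ∀ ys : List α, ys.Pairwise (fun a b => key b ≤ key a) →
    (PySem.List.insertBy (fun a b => decide (key b < key a)) x ys).filter p =
      if p x then PySem.List.insertBy (fun a b => decide (key b < key a)) x (ys.filter p)
      else ys.filter p := by
  intro ys
  induction ys with
  | nil =>
    intro _
    by_cases hp : p x <;> simp [PySem.List.insertBy, hp]
  | cons y ys ih =>
    intro hpw
    rw [List.pairwise_cons] at hpw
    obtain ⟨hy, hpw⟩ := hpw
    by_cases hb : key y < key x
    · have hstep : PySem.List.insertBy (fun a b => decide (key b < key a)) x (y :: ys) =
          x :: y :: ys := by simp [PySem.List.insertBy, hb]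
      rw [hstep]
      have hall : ∀ z ∈ (y :: ys).filter p, decide (key z < key x) = true := by
        intro z hz
        have hz' := List.mem_of_mem_filter hz
        rw [List.mem_cons] at hz'
        rcases hz' with rfl | hz'
        · simp [hb]
        · simp only [decide_eq_true_eq]
          exact lt_of_le_of_lt (hy z hz') hb
      rw [insertBy_all_before _ _ _ hall]
      by_cases hp : p x
      · simp [hp]
      · simp [hp]
    · have hstep : PySem.List.insertBy (fun a b => decide (key b < key a)) x (y :: ys) =
          y :: PySem.List.insertBy (fun a b => decide (key b < key a)) x ys := by
        simp [PySem.List.insertBy, hb]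
      rw [hstep]
      by_cases hp : p y
      · simp only [List.filter_cons, hp, if_true, ih hpw]
        by_cases hpx : p x
        · simp only [hpx, if_true]
          simp [PySem.List.insertBy, hb]
        · simp [hpx]
      · simp [hp, ih hpw]

-- sorted over an appended element (reverse=True)
lemma sorted_rev_append_singleton {α : Type} (key : α → Int) (xs : List α) (x : α) :
    PySem.List.sorted (xs ++ [x]) key true =
      PySem.List.insertBy (fun a b => decide (key b < key a)) x (PySem.List.sorted xs key true) := by
  rw [PySem.List.sorted_rev_eq_foldl_insertBy, PySem.List.sorted_rev_eq_foldl_insertBy,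
    List.foldl_append]
  rfl

-- stability: filtering commutes with the stable descending sort
lemma filter_sorted_rev {α : Type} (key : α → Int) (p : α → Bool) (xs : List α) :
    (PySem.List.sorted xs key true).filter p = PySem.List.sorted (xs.filter p) key true := by
  induction xs using List.reverseRecOn with
  | nil => rfl
  | append_singleton xs x ih =>
    rw [sorted_rev_append_singleton, List.filter_append,
      filter_insertBy key p x _ (PySem.List.sorted_pairwise_rev xs key),
      ih]
    by_cases hp : p x
    · simp [hp, sorted_rev_append_singleton]
    · simp [hp]

-- mapping a projection through insertBy when the key factors through it
lemma map_insertBy {α β : Type} (f : α → β) (key : β → Int) (x : α) :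
    ∀ ys : List α,
    (PySem.List.insertBy (fun a b => decide (key (f b) < key (f a))) x ys).map f =
      PySem.List.insertBy (fun a b => decide (key b < key a)) (f x) (ys.map f) := by
  intro ys
  induction ys with
  | nil => rfl
  | cons y ys ih =>
    by_cases hb : key (f y) < key (f x)
    · simp [PySem.List.insertBy, hb]
    · simp [PySem.List.insertBy, hb, ih]

lemma map_sorted_rev {α β : Type} (f : α → β) (key : β → Int) (xs : List α) :
    (PySem.List.sorted xs (fun t => key (f t)) true).map f =
      PySem.List.sorted (xs.map f) key true := by
  induction xs using List.reverseRecOn with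
  | nil => rfl
  | append_singleton xs x ih =>
    rw [sorted_rev_append_singleton, map_insertBy, ih, List.map_append, List.map_cons,
      List.map_nil, sorted_rev_append_singleton]

-- A's grouping step is exactly a modify-append step
lemma stepA_eq_modify (d : PySem.Dict String (List (String × Int))) (t : String × String × Int) :
    (let d' := if d.contains t.1 then d else d.insert t.1 []
     d'.insert t.1 (d'.getD t.1 [] ++ [t.2])) = d.modify t.1 [] (· ++ [t.2]) := by
  by_cases h : d.contains t.1
  · simp [h, PySem.Dict.modify]
  · simp only [h, Bool.false_eq_true, if_false]
    rw [PySem.Dict.getD_insert_self, PySem.Dict.insert_insert_self, PySem.Dict.modify,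
      PySem.Dict.getD_of_not_contains d [] (by simpa using h)]

-- B's key-registration loop: getD unchanged
lemma getD_keyLoop (xs : List (String × String × Int)) :
    ∀ (d : PySem.Dict String (List (String × Int))) (k : String),
    (xs.foldl (fun d t => if d.contains t.1 then d else d.insert t.1 []) d).getD k [] =
      d.getD k [] := by
  induction xs with
  | nil => intro d k; rfl
  | cons t xs ih =>
    intro d k
    simp only [List.foldl_cons]
    by_cases h : d.contains t.1
    · simp [h, ih]
    · simp only [h, Bool.false_eq_true, if_false, ih]
      rw [PySem.Dict.getD_insert]
      by_cases hk : k = t.1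
      · rw [if_pos hk, hk, PySem.Dict.getD_of_not_contains d [] (by simpa using h)]
      · rw [if_neg hk]

-- B's key-registration loop: keys accumulate as a set-update
lemma keys_keyLoop (xs : List (String × String × Int)) :
    ∀ (d : PySem.Dict String (List (String × Int))),
    (xs.foldl (fun d t => if d.contains t.1 then d else d.insert t.1 []) d).keys =
      PySem.Set.update d.keys (xs.map (·.1)) := by
  induction xs with
  | nil => intro d; rfl
  | cons t xs ih =>
    intro d
    simp only [List.foldl_cons, List.map_cons, PySem.Set.update, List.foldl_cons]
    have hadd : (if d.contains t.1 then d else d.insert t.1 ([] : List (String × Int))).keys =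
        PySem.Set.add d.keys t.1 := by
      by_cases h : d.contains t.1
      · have hmem : t.1 ∈ d.keys := by
          simpa [PySem.Dict.contains_eq_decide_mem_keys] using h
        simp only [h, if_true, PySem.Set.add]
        rw [if_pos ((PySem.Set.contains_iff d.keys t.1).mpr hmem)]
      · have hmem : ¬ t.1 ∈ d.keys := by
          simpa [PySem.Dict.contains_eq_decide_mem_keys] using h
        rw [if_neg (by simpa using h), PySem.Dict.keys_insert_of_not_contains d [] (by simpa using h)]
        simp only [PySem.Set.add]
        rw [if_neg (by simpa using hmem)]
    rw [ih, hadd]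
    rfl

-- a Set.update by elements already present is the identity
lemma set_update_of_subset {α : Type} [BEq α] [LawfulBEq α] :
    ∀ (xs s : List α), (∀ x ∈ xs, x ∈ s) → PySem.Set.update s xs = s := by
  intro xs
  induction xs with
  | nil => intro s _; rfl
  | cons x xs ih =>
    intro s h
    have hx : PySem.Set.add s x = s := by
      simp only [PySem.Set.add]
      rw [if_pos ((PySem.Set.contains_iff s x).mpr (h x (by simp)))]
    simp only [PySem.Set.update, List.foldl_cons]
    rw [show List.foldl PySem.Set.add (PySem.Set.add s x) xs =
        PySem.Set.update (PySem.Set.add s x) xs from rfl, hx]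
    exact ih s (fun y hy => h y (by simp [hy]))

-- A's second loop: each key's value gets sorted exactly once
lemma getD_sortLoop :
    ∀ (ks : List String) (d : PySem.Dict String (List (String × Int))), ks.Nodup →
    ∀ k : String,
    (ks.foldl (fun d k' => d.insert k' (PySem.List.sorted (d.getD k' []) (fun x => x.2) true)) d).getD k [] =
      if k ∈ ks then PySem.List.sorted (d.getD k []) (fun x => x.2) true else d.getD k [] := by
  intro ks
  induction ks with
  | nil => intro d _ k; simp
  | cons k0 ks ih =>
    intro d hnd k
    rw [List.nodup_cons] at hnd
    obtain ⟨hk0, hnd⟩ := hnd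
    simp only [List.foldl_cons]
    rw [ih _ hnd k]
    by_cases hmem : k ∈ ks
    · have hne : k ≠ k0 := fun h => hk0 (h ▸ hmem)
      rw [if_pos hmem, PySem.Dict.getD_insert, if_neg hne, if_pos (by simp [hmem])]
    · rw [if_neg hmem, PySem.Dict.getD_insert]
      by_cases hk : k = k0
      · simp [hk]
      · simp [hk, hmem]

-- the per-key heart: filter then sort = global stable sort then filter
lemma perKey (data : List (String × String × Int)) (k : String) :
    PySem.List.sorted ((data.filter (fun p => p.1 == k)).map (fun x => x.2)) (fun x => x.2) true =
      ((PySem.List.sorted data (fun x => x.2.2) true).filter (fun p => p.1 == k)).map (fun x => x.2) := by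
  rw [filter_sorted_rev (fun x => x.2.2) (fun p => p.1 == k) data]
  exact (map_sorted_rev (fun t : String × String × Int => t.2) (fun x : String × Int => x.2) _).symm

-- ===== VERDICT (by name: the statement is the Claim_ definition above) =====
theorem nested_aggregation_spec : Claim_equal_nested_aggregation := by
  intro data _
  unfold Spec_nested_aggregation nested_aggregation nested_aggregation_alt
  simp only []
  -- name the intermediate dictionaries
  set dM : PySem.Dict String (List (String × Int)) :=
    data.foldl (fun d p => d.modify p.1 [] (fun x => x ++ [p.2])) PySem.Dict.empty with hdM
  have hA1 : data.foldl (fun d t =>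
      let d := if d.contains t.1 then d else d.insert t.1 []
      d.insert t.1 (d.getD t.1 [] ++ [t.2])) PySem.Dict.empty = dM :=
    PySem.List.foldl_congr_mem data _ _ _ (fun acc x _ => stepA_eq_modify acc x)
  rw [hA1]
  set ordered := PySem.List.sorted data (fun x => x.2.2) true with hord
  set d0 : PySem.Dict String (List (String × Int)) :=
    data.foldl (fun d t => if d.contains t.1 then d else d.insert t.1 []) PySem.Dict.empty with hd0
  have hB2 : ordered.foldl (fun d t => d.insert t.1 (d.getD t.1 [] ++ [t.2])) d0 =
      ordered.foldl (fun d p => d.modify p.1 [] (fun x => x ++ [p.2])) d0 := rfl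
  rw [hB2]
  set dA := dM.keys.foldl (fun d dept =>
      d.insert dept (PySem.List.sorted (d.getD dept []) (fun x => x.2) true)) dM with hdA
  set dB := ordered.foldl (fun d p => d.modify p.1 [] (fun x => x ++ [p.2])) d0 with hdB
  -- key-list facts
  have hMkeys : dM.keys = PySem.Set.update [] (data.map (·.1)) := by
    rw [hdM, PySem.Dict.keys_foldl_modify_key data (·.1) [] (fun d x v => v ++ [x.2]),
      PySem.Dict.keys_empty]
  have hMnodup : dM.keys.Nodup := by
    rw [hdM]
    exact PySem.Dict.nodup_keys_foldl_modify_key data (·.1) [] (fun d x v => v ++ [x.2])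
      PySem.Dict.empty (by rw [PySem.Dict.keys_empty]; exact List.nodup_nil)
  have hmemE : ∀ x : String, x ∈ dM.keys ↔ x ∈ data.map (·.1) := by
    intro x
    rw [hMkeys, show PySem.Set.update ([] : List String) (data.map (·.1)) =
      PySem.Set.ofList (data.map (·.1)) from (PySem.Set.ofList_eq_foldl _).symm]
    exact PySem.Set.mem_ofList _ _
  have hAkeys : dA.keys = dM.keys := by
    rw [hdA, PySem.Dict.keys_foldl_insert dM.keys _ dM]
    exact set_update_of_subset dM.keys dM.keys (fun x hx => hx)
  have hAnodup : dA.keys.Nodup := by rw [hAkeys]; exact hMnodup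
  have hd0keys : d0.keys = dM.keys := by
    rw [hd0, keys_keyLoop data PySem.Dict.empty, PySem.Dict.keys_empty, hMkeys]
  have hBkeys : dB.keys = dM.keys := by
    rw [hdB, PySem.Dict.keys_foldl_modify_key ordered (·.1) [] (fun d x v => v ++ [x.2]) d0,
      hd0keys]
    apply set_update_of_subset
    intro x hx
    rw [List.mem_map] at hx
    obtain ⟨t, ht, rfl⟩ := hx
    have : t ∈ data := (PySem.List.sorted_perm data (fun x => x.2.2) true).mem_iff.mp ht
    exact (hmemE t.1).mpr (List.mem_map_of_mem this)
  have hBnodup : dB.keys.Nodup := by rw [hBkeys]; exact hMnodup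
  -- value facts
  have hMgetD : ∀ k, dM.getD k [] =
      (data.filter (fun p => p.1 == k)).map (fun x => x.2) := by
    intro k
    rw [hdM, PySem.Dict.getD_foldl_modify_append data PySem.Dict.empty k,
      PySem.Dict.getD_empty]
    simp
  have hAgetD : ∀ k, k ∈ dM.keys →
      dA.getD k [] = PySem.List.sorted (dM.getD k []) (fun x => x.2) true := by
    intro k hk
    rw [hdA, getD_sortLoop dM.keys dM hMnodup k, if_pos hk]
  have hBgetD : ∀ k, dB.getD k [] =
      (ordered.filter (fun p => p.1 == k)).map (fun x => x.2) := by
    intro k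
    rw [hdB, PySem.Dict.getD_foldl_modify_append ordered d0 k, hd0, getD_keyLoop data _ k,
      PySem.Dict.getD_empty]
    simp
  -- assemble via items = keys.map (k, getD k [])
  rw [PySem.Dict.items_eq_map_keys dA hAnodup [], PySem.Dict.items_eq_map_keys dB hBnodup [],
    hAkeys, hBkeys]
  apply List.map_congr_left
  intro k hk
  rw [hAgetD k hk, hBgetD k, hMgetD k, hord]
  rw [perKey data k]
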